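-- pv_equiv track=rewrite | github.com/posl/comment_recommendation | script/mod_gen/4_time/zh/161_D/5.py | isLuckyNumber
-- ===== SOURCE A (Python) =====
-- def isLuckyNumber(x):
--     if x < 10:
--         return True
--     else:
--         x = str(x)
--         for i in range(0, len(x)-1):
--             if abs(int(x[i])-int(x[i+1])) > 1:
--                 return False
--         return True
-- ===== SOURCE B (Python) =====
-- def isLuckyNumber(x):
--     if x < 10:
--         return True
--     prev = x % 10
--     x //= 10
--     while x:
--         cur = x % 10
--         if abs(cur - prev) > 1:
--             return False
--         prev = cur
--         x //= 10
--     return True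
-- ===== Notes on version B (the rewrite author's own statement) =====
-- stated objective: alternative
-- what changed: B extracts digits arithmetically (x % 10, x //= 10) keeping only the previous digit, instead of A's conversion to a string and indexed scan of adjacent characters.
import Mathlib
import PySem

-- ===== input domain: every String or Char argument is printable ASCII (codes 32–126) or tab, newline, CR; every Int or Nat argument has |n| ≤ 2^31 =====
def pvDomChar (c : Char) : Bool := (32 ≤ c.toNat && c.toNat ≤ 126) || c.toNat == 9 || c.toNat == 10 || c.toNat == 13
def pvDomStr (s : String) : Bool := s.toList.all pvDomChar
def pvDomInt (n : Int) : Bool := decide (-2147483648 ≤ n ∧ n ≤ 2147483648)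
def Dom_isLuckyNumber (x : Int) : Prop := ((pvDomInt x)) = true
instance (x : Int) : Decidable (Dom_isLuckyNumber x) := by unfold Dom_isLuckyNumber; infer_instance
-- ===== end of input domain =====

-- B replaces A's string conversion and index loop by arithmetic digit extraction (x % 10, x //= 10) with a running previous digit (alternative decomposition).

-- ===== PORT A =====
-- loop 'for i in range(0, len(x)-1): if abs(int(x[i])-int(x[i+1])) > 1: return False' with early return
def pvLoopA (s : List Char) : List Int → Bool
  | [] => true
  | i :: rest =>
    if 1 < ((PySem.Int.ofChars? [PySem.List.pyGetD s i ' ']).getD 0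
            - (PySem.Int.ofChars? [PySem.List.pyGetD s (i + 1) ' ']).getD 0).natAbs then
      false
    else pvLoopA s rest

def isLuckyNumber (x : Int) : Bool :=
  if x < 10 then true
  else
    let s := PySem.Int.toChars x
    pvLoopA s (PySem.List.pyRange 0 ((s.length : Int) - 1) 1)

-- ===== PORT B =====
-- 'while x:' — on the reachable inputs of this loop x is always positive, so the guard is 0 < x
def pvLoopB (prev x : Int) : Bool :=
  if hx : 0 < x then
    let cur := PySem.Int.mod x 10
    if 1 < (cur - prev).natAbs then false
    else pvLoopB cur (PySem.Int.floordiv x 10)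
  else true
termination_by x.toNat
decreasing_by
  have h10 : PySem.Int.floordiv x 10 = x / 10 := PySem.Int.floordiv_eq_ediv_of_pos (by omega)
  rw [h10]; omega

def isLuckyNumber_alt (x : Int) : Bool :=
  if x < 10 then true
  else pvLoopB (PySem.Int.mod x 10) (PySem.Int.floordiv x 10)

-- ===== PRECONDITION & SPEC =====
def Spec_isLuckyNumber (x : Int) (out : Bool) : Prop := out = isLuckyNumber_alt x
instance (x : Int) (out : Bool) : Decidable (Spec_isLuckyNumber x out) := by unfold Spec_isLuckyNumber; infer_instance

-- ===== CLAIM (what is proved, stated in full; the proofs are below) =====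
def Claim_equal_isLuckyNumber : Prop := ∀ (x : Int), Dom_isLuckyNumber x → Spec_isLuckyNumber x (isLuckyNumber x)

-- ===== LEMMAS AND PROOFS =====

/-- Adjacent-digit check over a digit list (most convenient common form). -/
def chainOK : List Nat → Bool
  | [] => true
  | [_] => true
  | a :: b :: t => if 1 < ((a : Int) - (b : Int)).natAbs then false else chainOK (b :: t)

lemma chainOK_iff (l : List Nat) :
    chainOK l = true ↔ l.IsChain (fun a b : Nat => ((a : Int) - (b : Int)).natAbs ≤ 1) := by
  induction l with
  | nil => simp [chainOK]
  | cons a t ih =>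
    cases t with
    | nil => simp [chainOK]
    | cons b t' =>
      rw [List.isChain_cons_cons]
      simp only [chainOK]
      split_ifs with h
      · simp; omega
      · rw [ih]; constructor
        · intro hc; exact ⟨by omega, hc⟩
        · intro hc; exact hc.2

lemma chainOK_reverse (l : List Nat) : chainOK l.reverse = chainOK l := by
  have hsym : ∀ l' : List Nat,
      l'.IsChain (fun a b : Nat => ((a : Int) - (b : Int)).natAbs ≤ 1) →
      l'.IsChain (fun a b : Nat => ((b : Int) - (a : Int)).natAbs ≤ 1) :=
    fun l' h => h.imp (fun hab => by omega)
  rcases h1 : chainOK l.reverse with _ | _ <;> rcases h2 : chainOK l with _ | _ <;> try rfl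
  · exfalso
    rw [chainOK_iff] at h2
    have := List.isChain_reverse.mpr (hsym l h2)
    rw [← chainOK_iff] at this
    simp [this] at h1
  · exfalso
    rw [chainOK_iff] at h1
    have := List.isChain_reverse.mpr (hsym l.reverse h1)
    rw [List.reverse_reverse, ← chainOK_iff] at this
    simp [this] at h2

/-- int('d') for a decimal digit character. -/
lemma ofChars_digitChar (d : Nat) (hd : d < 10) :
    PySem.Int.ofChars? [Nat.digitChar d] = some (d : Int) := by
  interval_cases d <;> decide

/-- B's loop computes the adjacent check over the base-10 digits, least significant first. -/
lemma loopB_eq (m : Nat) : ∀ prev : Nat,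
    pvLoopB (prev : Int) (m : Int) = chainOK (prev :: Nat.digits 10 m) := by
  induction m using Nat.strong_induction_on with
  | _ m ih =>
    intro prev
    rcases Nat.eq_zero_or_pos m with hm | hm
    · subst hm
      rw [pvLoopB]
      simp [chainOK]
    · rw [pvLoopB]
      have hpos : (0 : Int) < (m : Int) := by exact_mod_cast hm
      rw [dif_pos hpos]
      have hmod : PySem.Int.mod (m : Int) 10 = ((m % 10 : Nat) : Int) :=
        PySem.Int.mod_natCast m 10
      have hdiv : PySem.Int.floordiv (m : Int) 10 = ((m / 10 : Nat) : Int) :=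
        PySem.Int.floordiv_natCast m 10
      have hdig : Nat.digits 10 m = m % 10 :: Nat.digits 10 (m / 10) :=
        Nat.digits_def' (by norm_num) hm
      rw [hdig]
      simp only [hmod, hdiv, chainOK]
      have habs : (((m % 10 : Nat) : Int) - (prev : Int)).natAbs
          = ((prev : Int) - ((m % 10 : Nat) : Int)).natAbs := by omega
      rw [habs]
      split_ifs with h
      · rfl
      · exact ih (m / 10) (Nat.div_lt_self hm (by norm_num)) (m % 10)

/-- A's index loop over the digit characters, started at index j, checks adjacency on drop j. -/
lemma loopA_eq (ds : List Nat) (hds : ∀ d ∈ ds, d < 10) :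
    ∀ j : Nat, pvLoopA (ds.map Nat.digitChar) (PySem.List.pyRange (j : Int) ((ds.length : Int) - 1) 1)
      = chainOK (ds.drop j) := by
  intro j
  induction hj : ds.length - 1 - j generalizing j with
  | zero =>
    have hle : ((ds.length : Int) - 1) ≤ (j : Int) := by omega
    rw [PySem.List.pyRange_one_eq_nil hle]
    have hlen : (ds.drop j).length ≤ 1 := by rw [List.length_drop]; omega
    rcases h : ds.drop j with _ | ⟨a, _ | ⟨b, t⟩⟩
    · simp [pvLoopA, chainOK]
    · simp [pvLoopA, chainOK]
    · rw [h] at hlen; simp at hlen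
  | succ k ihk =>
    have hjlt : j + 1 < ds.length := by omega
    have hlt : (j : Int) < (ds.length : Int) - 1 := by omega
    rw [PySem.List.pyRange_one_cons hlt]
    have hget1 : PySem.List.pyGetD (ds.map Nat.digitChar) (j : Int) ' ' = Nat.digitChar ds[j] := by
      rw [PySem.List.pyGetD_natCast]
      rw [List.getD_eq_getElem _ _ (by simpa using by omega : j < (ds.map Nat.digitChar).length)]
      simp
    have hget2 : PySem.List.pyGetD (ds.map Nat.digitChar) ((j : Int) + 1) ' '
        = Nat.digitChar ds[j + 1] := by
      have : ((j : Int) + 1) = ((j + 1 : Nat) : Int) := by push_cast; ring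
      rw [this, PySem.List.pyGetD_natCast]
      rw [List.getD_eq_getElem _ _ (by simpa using hjlt)]
      simp
    rw [pvLoopA, hget1, hget2,
      ofChars_digitChar _ (hds _ (List.getElem_mem _)),
      ofChars_digitChar _ (hds _ (List.getElem_mem _))]
    have hdrop : ds.drop j = ds[j] :: ds[j + 1] :: ds.drop (j + 2) := by
      rw [List.drop_eq_getElem_cons (by omega), List.drop_eq_getElem_cons hjlt]
    rw [hdrop]
    simp only [chainOK, Option.getD_some]
    split_ifs with h
    · rfl
    · have := ihk (j + 1) (by omega)
      rw [List.drop_eq_getElem_cons hjlt] at this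
      have hcast : ((j : Int) + 1) = ((j + 1 : Nat) : Int) := by push_cast; ring
      rw [hcast, this]

/-- `Nat.toDigits` is the digit list, most significant first, rendered with `digitChar`. -/
lemma toDigitsCore_eq (f : Nat) : ∀ (n : Nat) (acc : List Char), 0 < n → n < 10 ^ f →
    Nat.toDigitsCore 10 f n acc = ((Nat.digits 10 n).map Nat.digitChar).reverse ++ acc := by
  induction f with
  | zero => intro n acc h1 h2; omega
  | succ f ih =>
    intro n acc h1 h2
    rw [Nat.toDigitsCore]
    have hdig : Nat.digits 10 n = n % 10 :: Nat.digits 10 (n / 10) :=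
      Nat.digits_def' (by norm_num) h1
    by_cases h : n / 10 = 0
    · have : Nat.digits 10 (n / 10) = [] := by rw [h]; simp
      rw [if_pos h, hdig, this]
      simp
    · rw [if_neg h]
      have hlt : n / 10 < 10 ^ f :=
        Nat.div_lt_of_lt_mul (by rw [← pow_succ']; exact h2)
      rw [ih (n / 10) _ (Nat.pos_of_ne_zero h) hlt, hdig]
      simp

lemma toDigits_eq (n : Nat) (hn : 0 < n) :
    Nat.toDigits 10 n = ((Nat.digits 10 n).map Nat.digitChar).reverse := by
  rw [Nat.toDigits, toDigitsCore_eq (n + 1) n [] hn]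
  · simp
  · calc n < 10 ^ n := Nat.lt_pow_self (by norm_num)
      _ ≤ 10 ^ (n + 1) := Nat.pow_le_pow_right (by norm_num) (by omega)

-- ===== VERDICT (by name: the statement is the Claim_ definition above) =====
theorem isLuckyNumber_spec : Claim_equal_isLuckyNumber := by
  intro x _
  unfold Spec_isLuckyNumber isLuckyNumber isLuckyNumber_alt
  by_cases hx : x < 10
  · rw [if_pos hx, if_pos hx]
  · rw [if_neg hx, if_neg hx]
    have hx0 : (0 : Int) ≤ x := by omega
    set n : Nat := x.toNat with hn
    have hxn : x = (n : Int) := by omega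
    have hn10 : 10 ≤ n := by omega
    have hpos : 0 < n := by omega
    -- A side
    have hchars : PySem.Int.toChars x = ((Nat.digits 10 n).map Nat.digitChar).reverse := by
      rw [hxn]
      show PySem.Int.toChars (n : Int) = _
      rw [PySem.Int.toChars, if_neg (by omega), ← toDigits_eq n hpos]
      simp
    have hrevmap : ((Nat.digits 10 n).map Nat.digitChar).reverse
        = ((Nat.digits 10 n).reverse.map Nat.digitChar) := by
      rw [List.map_reverse]
    have hall : ∀ d ∈ (Nat.digits 10 n).reverse, d < 10 := by
      intro d hd
      exact Nat.digits_lt_base (by norm_num) (List.mem_reverse.mp hd)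
    have hA := loopA_eq (Nat.digits 10 n).reverse hall 0
    simp only [List.length_reverse, Nat.cast_zero, List.drop_zero] at hA
    simp only [hchars, hrevmap, List.length_map, List.length_reverse]
    rw [hA]
    -- B side
    have hdig : Nat.digits 10 n = n % 10 :: Nat.digits 10 (n / 10) :=
      Nat.digits_def' (by norm_num) hpos
    have hmod : PySem.Int.mod x 10 = ((n % 10 : Nat) : Int) := by
      rw [hxn]; exact PySem.Int.mod_natCast n 10
    have hdiv : PySem.Int.floordiv x 10 = ((n / 10 : Nat) : Int) := by
      rw [hxn]; exact PySem.Int.floordiv_natCast n 10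
    rw [hmod, hdiv, loopB_eq (n / 10) (n % 10), ← hdig, chainOK_reverse]
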